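-- pv_equiv track=rewrite | github.com/mrxiuer/drawforsts2 | main.py | _organize_paths
-- ===== SOURCE A (Python) =====
-- def _organize_paths(points, width, height):
--     """将散点组织成连续的路径"""
--     if not points:
--         return []
--
--     # 转换为集合方便查找
--     point_set = set(points)
--
--     paths = []
--     used = set()
--
--     # 按行组织路径
--     for y in range(height):
--         row_points = [
--             (x, y)
--             for x in range(width)
--             if (x, y) in point_set and (x, y) not in used
--         ]
--         if not row_points:
--             continue
--
--         # 将这一行的连续点连成路径
--         row_points.sort(key=lambda p: p[0])
--
--         current_path = []
--         for i, pt in enumerate(row_points):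
--             if i == 0:
--                 current_path.append(pt)
--             else:
--                 # 检查是否与上一个点相邻
--                 prev = current_path[-1]
--                 if abs(pt[0] - prev[0]) <= 3:  # 允许小间隙
--                     current_path.append(pt)
--                 else:
--                     # 间隙太大，保存当前路径，开始新路径
--                     if len(current_path) >= 1:
--                         paths.append(current_path)
--                     current_path = [pt]
--             used.add(pt)
--
--         if len(current_path) >= 1:
--             paths.append(current_path)
--
--     # 移除太短的路径
--     paths = [p for p in paths if len(p) >= 1]
--
--     return paths
-- ===== SOURCE B (Python) =====
-- def _organize_paths(points, width, height):
--     """Group in-grid points by row via a dict, then split each sorted row at gaps > 3."""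
--     rows = {}
--     for (x, y) in points:
--         if 0 <= x < width and 0 <= y < height:
--             rows.setdefault(y, set()).add(x)
--     paths = []
--     for y in sorted(rows):
--         path = []
--         for x in sorted(rows[y]):
--             if path and x - path[-1][0] <= 3:
--                 path.append((x, y))
--             else:
--                 if path:
--                     paths.append(path)
--                 path = [(x, y)]
--         paths.append(path)
--     return paths
-- ===== Notes on version B (the rewrite author's own statement) =====
-- stated objective: faster
-- what changed: Instead of scanning every (x, y) cell of the width x height grid against a point set (with a redundant 'used' set and a sort of an already-sorted row), B buckets the in-grid points themselves by y in a dict of sets, then iterates the sorted row keys and splits each sorted row at gaps > 3.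
import Mathlib
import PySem

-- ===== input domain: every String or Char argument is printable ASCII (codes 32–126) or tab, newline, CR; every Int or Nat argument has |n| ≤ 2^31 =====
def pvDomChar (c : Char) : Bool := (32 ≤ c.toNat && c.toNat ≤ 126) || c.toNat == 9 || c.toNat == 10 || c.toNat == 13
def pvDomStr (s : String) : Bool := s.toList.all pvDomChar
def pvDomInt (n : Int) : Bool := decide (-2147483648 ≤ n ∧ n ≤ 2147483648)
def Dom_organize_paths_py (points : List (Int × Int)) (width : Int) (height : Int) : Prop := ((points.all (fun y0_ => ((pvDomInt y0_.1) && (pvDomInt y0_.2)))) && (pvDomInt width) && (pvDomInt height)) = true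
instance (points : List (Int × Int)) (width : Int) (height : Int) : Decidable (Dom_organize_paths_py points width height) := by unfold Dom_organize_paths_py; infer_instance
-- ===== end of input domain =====

-- B replaces A's per-row scan of the whole grid by grouping the points themselves by
-- row in a dict and sorting (objective: faster). Return-value equivalence only.


-- shared indexing helper: Python's path[-1]; both programs only evaluate it on a
-- nonempty path, so the .getD default is unreachable
def pyLast (l : List (Int × Int)) : Int × Int := (PySem.List.pyGet? l (-1)).getD (0, 0)

-- ===== PORT A =====
-- the body of A's inner loop 'for i, pt in enumerate(row_points)' (state: current_path, paths, used)
def aInnerStep (st2 : List (Int × Int) × List (List (Int × Int)) × PySem.Set (Int × Int))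
    (ipt : Int × (Int × Int)) :
    List (Int × Int) × List (List (Int × Int)) × PySem.Set (Int × Int) :=
  let current_path := st2.1
  let paths := st2.2.1
  let used := st2.2.2
  let pt := ipt.2
  let next :=
    if ipt.1 = 0 then (current_path ++ [pt], paths)
    else
      let prev := pyLast current_path
      if |pt.1 - prev.1| ≤ 3 then (current_path ++ [pt], paths)
      else ([pt], if current_path.length ≥ 1 then paths ++ [current_path] else paths)
  (next.1, next.2, PySem.Set.add used pt)

-- the body of A's outer loop 'for y in range(height)' (state: paths, used)
def aOuterStep (point_set : PySem.Set (Int × Int)) (width : Int)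
    (st : List (List (Int × Int)) × PySem.Set (Int × Int)) (y : Int) :
    List (List (Int × Int)) × PySem.Set (Int × Int) :=
  let paths := st.1
  let used := st.2
  let row_points := ((PySem.List.pyRange 0 width 1).filter
      (fun x => PySem.Set.contains point_set (x, y) &&
                !PySem.Set.contains used (x, y))).map (fun x => (x, y))
  if row_points = [] then (paths, used)
  else
    let row_points := PySem.List.sorted row_points (fun p => p.1) false
    let st2 := (PySem.List.enumerate row_points 0).foldl aInnerStep ([], paths, used)
    ((if st2.1.length ≥ 1 then st2.2.1 ++ [st2.1] else st2.2.1), st2.2.2)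

def organize_paths_py (points : List (Int × Int)) (width : Int) (height : Int) : List (List (Int × Int)) :=
  if points = [] then []
  else
    let point_set : PySem.Set (Int × Int) := PySem.Set.ofList points
    let st := (PySem.List.pyRange 0 height 1).foldl (aOuterStep point_set width)
      ([], PySem.Set.empty)
    st.1.filter (fun p => decide (p.length ≥ 1))

-- ===== PORT B =====
-- the body of B's inner loop 'for x in sorted(rows[y])' (state: paths, path)
def segStep (y : Int) (st : List (List (Int × Int)) × List (Int × Int)) (x : Int) :
    List (List (Int × Int)) × List (Int × Int) :=
  if st.2 ≠ [] ∧ x - (pyLast st.2).1 ≤ 3 then (st.1, st.2 ++ [(x, y)])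
  else ((if st.2 ≠ [] then st.1 ++ [st.2] else st.1), [(x, y)])

def organize_paths_py_alt (points : List (Int × Int)) (width : Int) (height : Int) : List (List (Int × Int)) :=
  let rows : PySem.Dict Int (PySem.Set Int) := points.foldl
    (fun d p =>
      if 0 ≤ p.1 ∧ p.1 < width ∧ 0 ≤ p.2 ∧ p.2 < height then
        d.modify p.2 PySem.Set.empty (fun s => PySem.Set.add s p.1)
      else d)
    PySem.Dict.empty
  (PySem.List.sorted rows.keys (fun y => y) false).foldl
    (fun paths y =>
      let st := (PySem.List.sorted (rows.getD y PySem.Set.empty) (fun x => x) false).foldl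
        (segStep y) (paths, [])
      st.1 ++ [st.2])
    []

-- ===== PRECONDITION & SPEC =====
def Spec_organize_paths_py (points : List (Int × Int)) (width : Int) (height : Int) (out : List (List (Int × Int))) : Prop := out = organize_paths_py_alt points width height
instance (points : List (Int × Int)) (width : Int) (height : Int) (out : List (List (Int × Int))) : Decidable (Spec_organize_paths_py points width height out) := by unfold Spec_organize_paths_py; infer_instance

-- ===== CLAIM (what is proved, stated in full; the proofs are below) =====
def Claim_equal_organize_paths_py : Prop := ∀ (points : List (Int × Int)) (width : Int) (height : Int), Dom_organize_paths_py points width height → Spec_organize_paths_py points width height (organize_paths_py points width height)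

-- ===== LEMMAS AND PROOFS =====

-- the canonical intermediate form both programs are reduced to
def rowXs (points : List (Int × Int)) (width : Int) (y : Int) : List Int :=
  (PySem.List.pyRange 0 width 1).filter (fun x => decide ((x, y) ∈ points))

def canonStep (points : List (Int × Int)) (width : Int)
    (paths : List (List (Int × Int))) (y : Int) : List (List (Int × Int)) :=
  if rowXs points width y ≠ [] then
    let st := (rowXs points width y).foldl (segStep y) (paths, [])
    st.1 ++ [st.2]
  else paths

def canon (points : List (Int × Int)) (width : Int) (height : Int) : List (List (Int × Int)) :=
  (PySem.List.pyRange 0 height 1).foldl (canonStep points width) []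

theorem pyLast_concat (l : List (Int × Int)) (p : Int × Int) : pyLast (l ++ [p]) = p := by
  simp [pyLast, PySem.List.pyGet?, PySem.List.pyIdx?]

theorem pyLast_singleton (p : Int × Int) : pyLast [p] = p := by
  simpa using pyLast_concat [] p

theorem segfold_cur_ne_nil (y : Int) (xs : List Int) (paths : List (List (Int × Int)))
    (cur : List (Int × Int)) (h : cur ≠ []) : (xs.foldl (segStep y) (paths, cur)).2 ≠ [] := by
  induction xs generalizing paths cur with
  | nil => simpa using h
  | cons x xs ih =>
    simp only [List.foldl_cons]
    unfold segStep
    split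
    · exact ih _ _ (by simp)
    · exact ih _ _ (by simp)

theorem segfold_cur_ne_nil' (y : Int) (xs : List Int) (paths : List (List (Int × Int)))
    (h : xs ≠ []) : (xs.foldl (segStep y) (paths, [])).2 ≠ [] := by
  match xs with
  | x :: xs =>
    simp only [List.foldl_cons]
    have hstep : segStep y (paths, []) x = (paths, [(x, y)]) := by simp [segStep]
    rw [hstep]
    exact segfold_cur_ne_nil y xs paths [(x, y)] (by simp)

theorem segfold_paths_ne_nil (y : Int) (xs : List Int) (paths : List (List (Int × Int)))
    (cur : List (Int × Int)) (h : ∀ p ∈ paths, p ≠ []) :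
    ∀ p ∈ (xs.foldl (segStep y) (paths, cur)).1, p ≠ [] := by
  induction xs generalizing paths cur with
  | nil => simpa using h
  | cons x xs ih =>
    simp only [List.foldl_cons]
    unfold segStep
    split
    · exact ih _ _ h
    · refine ih _ _ ?_
      intro p hp
      split at hp
      · rcases List.mem_append.1 hp with hp | hp
        · exact h p hp
        · simp at hp; subst hp; assumption
      · exact h p hp

theorem canonfold_ne_nil (points : List (Int × Int)) (width : Int) (L : List Int)
    (paths : List (List (Int × Int))) (h : ∀ p ∈ paths, p ≠ []) :
    ∀ p ∈ L.foldl (canonStep points width) paths, p ≠ [] := by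
  induction L generalizing paths with
  | nil => simpa using h
  | cons y L ih =>
    simp only [List.foldl_cons]
    unfold canonStep
    split
    · next hne =>
      refine ih _ ?_
      intro p hp
      rcases List.mem_append.1 hp with hp | hp
      · exact segfold_paths_ne_nil y _ paths [] h p hp
      · simp at hp; subst hp
        exact segfold_cur_ne_nil' y _ paths hne
    · exact ih _ h

-- ===== A = canon =====

theorem innerA (y : Int) (xs : List Int) : ∀ (s : Int) (cur : List (Int × Int))
    (paths : List (List (Int × Int))) (used : PySem.Set (Int × Int)),
    1 ≤ s → cur ≠ [] → (∀ x ∈ xs, (pyLast cur).1 < x) → xs.Pairwise (· < ·) →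
    (PySem.List.enumerate (xs.map (fun x => (x, y))) s).foldl aInnerStep (cur, paths, used)
      = ((xs.foldl (segStep y) (paths, cur)).2, (xs.foldl (segStep y) (paths, cur)).1,
         PySem.Set.update used (xs.map (fun x => (x, y)))) := by
  induction xs with
  | nil =>
    intro s cur paths used _ _ _ _
    simp [PySem.List.enumerate_nil, PySem.Set.update]
  | cons x xs ih =>
    intro s cur paths used hs hcur hlt hpw
    have hx : (pyLast cur).1 < x := hlt x (by simp)
    rw [List.map_cons, PySem.List.enumerate_cons, List.foldl_cons, List.foldl_cons]
    have hupd : PySem.Set.update used ((x, y) :: xs.map (fun x => (x, y)))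
        = PySem.Set.update (PySem.Set.add used (x, y)) (xs.map (fun x => (x, y))) := by
      simp [PySem.Set.update]
    by_cases h3 : x - (pyLast cur).1 ≤ 3
    · have hstep : aInnerStep (cur, paths, used) (s, (x, y))
          = (cur ++ [(x, y)], paths, PySem.Set.add used (x, y)) := by
        have habs : |x - (pyLast cur).1| ≤ 3 := by rw [abs_of_pos (by omega)]; exact h3
        simp [aInnerStep, show ¬ (s = 0) by omega, habs]
      have hseg : segStep y (paths, cur) x = (paths, cur ++ [(x, y)]) := by
        simp only [segStep]
        rw [if_pos ⟨hcur, h3⟩]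
      rw [hstep, hseg, hupd]
      exact ih (s + 1) (cur ++ [(x, y)]) paths (PySem.Set.add used (x, y)) (by omega)
        (by simp) (by intro x' hx'; rw [pyLast_concat]; exact (List.pairwise_cons.1 hpw).1 x' hx')
        hpw.of_cons
    · have hstep : aInnerStep (cur, paths, used) (s, (x, y))
          = ([(x, y)], paths ++ [cur], PySem.Set.add used (x, y)) := by
        have habs : ¬ |x - (pyLast cur).1| ≤ 3 := by rw [abs_of_pos (by omega)]; exact h3
        have hlen : cur.length ≥ 1 := List.length_pos_of_ne_nil hcur
        simp [aInnerStep, show ¬ (s = 0) by omega, habs, hlen]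
      have hseg : segStep y (paths, cur) x = (paths ++ [cur], [(x, y)]) := by
        simp only [segStep]
        rw [if_neg (by intro h; exact h3 h.2), if_pos hcur]
      rw [hstep, hseg, hupd]
      exact ih (s + 1) [(x, y)] (paths ++ [cur]) (PySem.Set.add used (x, y)) (by omega)
        (by simp) (by intro x' hx'; rw [pyLast_singleton]; exact (List.pairwise_cons.1 hpw).1 x' hx')
        hpw.of_cons

theorem outerA (points : List (Int × Int)) (width : Int) (L : List Int) :
    ∀ (paths : List (List (Int × Int))) (used : PySem.Set (Int × Int)),
    L.Nodup → (∀ p ∈ used, p.2 ∉ L) →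
    (L.foldl (aOuterStep (PySem.Set.ofList points) width) (paths, used)).1
      = L.foldl (canonStep points width) paths := by
  induction L with
  | nil => intro paths used _ _; simp
  | cons y L ih =>
    intro paths used hnd hused
    simp only [List.foldl_cons]
    have hfil : (PySem.List.pyRange 0 width 1).filter
        (fun x => PySem.Set.contains (PySem.Set.ofList points) (x, y)
                  && !PySem.Set.contains used (x, y))
        = rowXs points width y := by
      unfold rowXs
      apply List.filter_congr
      intro x _
      have h2 : (x, y) ∉ used := fun hmem => (hused _ hmem) (by simp)
      simp [PySem.Set.contains, h2]
    have hrow : aOuterStep (PySem.Set.ofList points) width (paths, used) y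
        = ((canonStep points width paths y),
           PySem.Set.update used ((rowXs points width y).map (fun x => (x, y)))) := by
      simp only [aOuterStep, canonStep]
      rw [hfil]
      by_cases hne : rowXs points width y = []
      · simp [hne, PySem.Set.update]
      · rcases List.exists_cons_of_ne_nil hne with ⟨x0, rest, hsplit⟩
        have hpwrow : (rowXs points width y).Pairwise (· < ·) :=
          (PySem.List.pairwise_lt_pyRange_one 0 width).filter _
        have hsorted : PySem.List.sorted ((rowXs points width y).map (fun x => (x, y)))
            (fun p => p.1) false = (rowXs points width y).map (fun x => (x, y)) := by
          apply PySem.List.sorted_eq_self_of_pairwise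
          refine (List.pairwise_map.2 ?_)
          exact hpwrow.imp (fun h => le_of_lt h)
        rw [if_neg (by simp [hsplit])]
        rw [hsorted, hsplit]
        rw [List.map_cons, PySem.List.enumerate_cons, List.foldl_cons]
        have hfirst : aInnerStep ([], paths, used) (0, (x0, y))
            = ([(x0, y)], paths, PySem.Set.add used (x0, y)) := by
          simp [aInnerStep]
        rw [hfirst]
        have hpw' : rest.Pairwise (· < ·) := by
          rw [hsplit] at hpwrow; exact hpwrow.of_cons
        have hlt : ∀ x ∈ rest, (pyLast [(x0, y)]).1 < x := by
          intro x hx; rw [pyLast_singleton]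
          rw [hsplit] at hpwrow; exact (List.pairwise_cons.1 hpwrow).1 x hx
        rw [show (0 : Int) + 1 = 1 from by norm_num,
          innerA y rest 1 [(x0, y)] paths (PySem.Set.add used (x0, y)) le_rfl (by simp) hlt hpw']
        have hseg0 : segStep y (paths, []) x0 = (paths, [(x0, y)]) := by
          simp [segStep]
        rw [List.foldl_cons, hseg0]
        have hcne : (rest.foldl (segStep y) (paths, [(x0, y)])).2 ≠ [] :=
          segfold_cur_ne_nil y rest paths [(x0, y)] (by simp)
        have hlen : (rest.foldl (segStep y) (paths, [(x0, y)])).2.length ≥ 1 :=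
          List.length_pos_of_ne_nil hcne
        rw [if_pos hlen]
        simp [PySem.Set.update]
    rw [hrow]
    rw [ih (canonStep points width paths y)
        (PySem.Set.update used ((rowXs points width y).map (fun x => (x, y))))
        hnd.of_cons ?_]
    intro p hp
    rw [PySem.Set.mem_update] at hp
    rcases hp with hp | hp
    · exact fun hL => (hused p hp) (List.mem_cons_of_mem _ hL)
    · rcases List.mem_map.1 hp with ⟨x, _, rfl⟩
      exact (List.nodup_cons.1 hnd).1

theorem canon_nil (width height : Int) : canon [] width height = [] := by
  unfold canon
  have h : ∀ (L : List Int) (paths : List (List (Int × Int))),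
      L.foldl (canonStep ([] : List (Int × Int)) width) paths = paths := by
    intro L
    induction L with
    | nil => intro paths; simp
    | cons y L ih =>
      intro paths
      simp only [List.foldl_cons]
      have : canonStep ([] : List (Int × Int)) width paths y = paths := by
        simp [canonStep, rowXs]
      rw [this, ih]
  exact h _ _

theorem a_eq_canon (points : List (Int × Int)) (width height : Int) :
    organize_paths_py points width height = canon points width height := by
  by_cases hp : points = []
  · subst hp; rw [canon_nil]; simp [organize_paths_py]
  · unfold organize_paths_py
    rw [if_neg hp]
    have hout := outerA points width (PySem.List.pyRange 0 height 1) []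
      PySem.Set.empty (PySem.List.nodup_pyRange_one 0 height) (by intro p hp'; cases hp')
    simp only [hout]
    apply List.filter_eq_self.2
    intro p hpmem
    have := canonfold_ne_nil points width (PySem.List.pyRange 0 height 1) [] (by simp) p hpmem
    rcases List.exists_cons_of_ne_nil this with ⟨a, t, rfl⟩
    simp

-- ===== B = canon =====

-- ===== B-side characterisations =====

def inGrid (width height : Int) (p : Int × Int) : Bool :=
  decide (0 ≤ p.1 ∧ p.1 < width ∧ 0 ≤ p.2 ∧ p.2 < height)

def rowsDict (points : List (Int × Int)) (width height : Int) : PySem.Dict Int (PySem.Set Int) :=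
  (points.filter (inGrid width height)).foldl
    (fun d p => d.modify p.2 PySem.Set.empty (fun s => PySem.Set.add s p.1)) PySem.Dict.empty

def bYs (points : List (Int × Int)) (width height : Int) : List Int :=
  (PySem.List.pyRange 0 height 1).filter (fun y => decide (rowXs points width y ≠ []))

theorem foldl_congr_mem' {α β : Type} (l : List β) (f g : α → β → α) :
    ∀ (i : α), (∀ b ∈ l, ∀ a, f a b = g a b) → l.foldl f i = l.foldl g i := by
  induction l with
  | nil => intro i _; rfl
  | cons b l ih =>
    intro i h
    simp only [List.foldl_cons]
    rw [h b (by simp) i]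
    exact ih _ (fun b' hb' a => h b' (by simp [hb']) a)

theorem rows_eq (points : List (Int × Int)) (width height : Int) :
    points.foldl
      (fun d p =>
        if 0 ≤ p.1 ∧ p.1 < width ∧ 0 ≤ p.2 ∧ p.2 < height then
          d.modify p.2 PySem.Set.empty (fun s => PySem.Set.add s p.1)
        else d) PySem.Dict.empty = rowsDict points width height := by
  unfold rowsDict
  rw [List.foldl_filter]
  apply foldl_congr_mem'
  intro p _ d
  by_cases h : 0 ≤ p.1 ∧ p.1 < width ∧ 0 ≤ p.2 ∧ p.2 < height
  · simp [inGrid, h]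
  · simp [inGrid, h]

theorem keys_rows (points : List (Int × Int)) (width height : Int) :
    (rowsDict points width height).keys
      = PySem.Set.ofList ((points.filter (inGrid width height)).map (fun p => p.2)) := by
  unfold rowsDict
  rw [PySem.Dict.keys_foldl_modify_key]
  simp [PySem.Set.update_nil_left]

theorem getD_group (l : List (Int × Int)) : ∀ (d : PySem.Dict Int (PySem.Set Int)) (y : Int),
    (l.foldl (fun d p => d.modify p.2 PySem.Set.empty (fun s => PySem.Set.add s p.1)) d).getD y
        PySem.Set.empty
      = PySem.Set.update (d.getD y PySem.Set.empty)
          ((l.filter (fun p => p.2 == y)).map (fun p => p.1)) := by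
  induction l with
  | nil => intro d y; simp [PySem.Set.update]
  | cons p l ih =>
    intro d y
    simp only [List.foldl_cons]
    rw [ih]
    rw [PySem.Dict.getD_modify]
    by_cases hy : y = p.2
    · rw [if_pos hy, List.filter_cons_of_pos (by simp [hy]), List.map_cons]
      subst hy
      simp [PySem.Set.update]
    · rw [if_neg hy, List.filter_cons_of_neg (by simp; exact fun h => hy h.symm)]

theorem rowXs_mem (points : List (Int × Int)) (width y x : Int) :
    x ∈ rowXs points width y ↔ (0 ≤ x ∧ x < width) ∧ (x, y) ∈ points := by
  simp [rowXs, PySem.List.mem_pyRange_one]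

theorem rowXs_ne_nil_iff (points : List (Int × Int)) (width y : Int) :
    rowXs points width y ≠ [] ↔ ∃ x, (0 ≤ x ∧ x < width) ∧ (x, y) ∈ points := by
  rw [← List.isEmpty_eq_false_iff, List.isEmpty_eq_false_iff_exists_mem]
  constructor
  · rintro ⟨x, hx⟩; exact ⟨x, (rowXs_mem points width y x).1 hx⟩
  · rintro ⟨x, hx⟩; exact ⟨x, (rowXs_mem points width y x).2 hx⟩

theorem rowXs_nodup (points : List (Int × Int)) (width y : Int) :
    (rowXs points width y).Nodup :=
  (PySem.List.nodup_pyRange_one 0 width).filter _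

theorem rowXs_pairwise (points : List (Int × Int)) (width y : Int) :
    (rowXs points width y).Pairwise (· < ·) :=
  (PySem.List.pairwise_lt_pyRange_one 0 width).filter _

theorem sortedKeys_eq (points : List (Int × Int)) (width height : Int) :
    PySem.List.sorted (rowsDict points width height).keys (fun y => y) false
      = bYs points width height := by
  apply PySem.List.sorted_eq_of_perm_of_pairwise_lt
  · rw [keys_rows]
    unfold bYs
    rw [List.perm_ext_iff_of_nodup
      ((PySem.List.nodup_pyRange_one 0 height).filter _)
      (PySem.Set.nodup_ofList _)]
    intro y
    rw [PySem.Set.mem_ofList]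
    simp only [List.mem_filter, List.mem_map, List.mem_filter, PySem.List.mem_pyRange_one,
      decide_eq_true_eq, inGrid]
    rw [rowXs_ne_nil_iff]
    constructor
    · rintro ⟨⟨hy0, hy1⟩, x, ⟨hx0, hx1⟩, hmem⟩
      exact ⟨⟨x, y⟩, ⟨hmem, by simp; omega⟩, rfl⟩
    · rintro ⟨⟨x, y'⟩, ⟨hmem, hgrid⟩, rfl⟩
      simp at hgrid
      exact ⟨⟨by omega, by omega⟩, x, ⟨by omega, by omega⟩, hmem⟩
  · unfold bYs
    exact ((PySem.List.pairwise_lt_pyRange_one 0 height).filter _)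

theorem sortedRow_eq (points : List (Int × Int)) (width height y : Int)
    (h0 : 0 ≤ y) (h1 : y < height) :
    PySem.List.sorted ((rowsDict points width height).getD y PySem.Set.empty) (fun x => x) false
      = rowXs points width y := by
  unfold rowsDict
  rw [getD_group]
  apply PySem.List.sorted_eq_of_perm_of_pairwise_lt
  · have hset : PySem.Set.update ((PySem.Dict.empty : PySem.Dict Int (PySem.Set Int)).getD y
        PySem.Set.empty) (((points.filter (inGrid width height)).filter
          (fun p => p.2 == y)).map (fun p => p.1))
        = PySem.Set.ofList (((points.filter (inGrid width height)).filter
          (fun p => p.2 == y)).map (fun p => p.1)) := by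
      simp [PySem.Set.update_nil_left]
    rw [hset]
    rw [List.perm_ext_iff_of_nodup (rowXs_nodup points width y) (PySem.Set.nodup_ofList _)]
    intro x
    rw [PySem.Set.mem_ofList, rowXs_mem]
    simp only [List.mem_map, List.mem_filter, inGrid, decide_eq_true_eq, beq_iff_eq]
    constructor
    · rintro ⟨⟨hx0, hx1⟩, hmem⟩
      exact ⟨⟨x, y⟩, ⟨⟨hmem, by omega⟩, rfl⟩, rfl⟩
    · rintro ⟨⟨x', y'⟩, ⟨⟨hmem, hgrid⟩, hy⟩, rfl⟩
      simp at hy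
      subst hy
      exact ⟨⟨by omega, by omega⟩, hmem⟩
  · exact rowXs_pairwise points width y

theorem canon_eq_filtered (points : List (Int × Int)) (width height : Int) :
    canon points width height
      = (bYs points width height).foldl
          (fun paths y =>
            let st := (rowXs points width y).foldl (segStep y) (paths, [])
            st.1 ++ [st.2]) [] := by
  unfold canon bYs
  rw [List.foldl_filter]
  apply foldl_congr_mem'
  intro y _ paths
  by_cases h : rowXs points width y ≠ []
  · simp [canonStep, h]
  · simp [canonStep, h]

theorem b_eq_canon (points : List (Int × Int)) (width height : Int) :
    organize_paths_py_alt points width height = canon points width height := by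
  simp only [organize_paths_py_alt]
  rw [rows_eq, sortedKeys_eq, canon_eq_filtered]
  apply foldl_congr_mem'
  intro y hy paths
  have hyR : y ∈ PySem.List.pyRange 0 height 1 := (List.mem_filter.1 hy).1
  rw [PySem.List.mem_pyRange_one] at hyR
  rw [sortedRow_eq points width height y hyR.1 hyR.2]

-- ===== VERDICT (by name: the statement is the Claim_ definition above) =====
theorem organize_paths_py_spec : Claim_equal_organize_paths_py := by
  intro points width height _
  unfold Spec_organize_paths_py
  rw [a_eq_canon, b_eq_canon]
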